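-- pv_equiv track=rewrite | github.com/arjunbandari/medicalchatbott | app.py | search_content
-- ===== SOURCE A (Python) =====
-- def search_content(query, sentences):
--     query = query.lower()
--     results = sorted(
--         sentences,
--         key=lambda s: sum(word in s.lower() for word in query.split()),
--         reverse=True
--     )
--     # Return the most relevant 1-2 sentences
--     return results[:2] if results else ["No relevant information found."]
-- ===== SOURCE B (Python) =====
-- def search_content(query, sentences):
--     words = query.lower().split()
--     best = None   # (score, sentence) of the highest-scoring sentence seen (earliest wins ties)
--     second = None # (score, sentence) of the runner-up
--     for s in sentences:
--         sc = sum(w in s.lower() for w in words)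
--         if best is None or sc > best[0]:
--             second = best
--             best = (sc, s)
--         elif second is None or sc > second[0]:
--             second = (sc, s)
--     if best is None:
--         return ["No relevant information found."]
--     if second is None:
--         return [best[1]]
--     return [best[1], second[1]]
-- ===== Notes on version B (the rewrite author's own statement) =====
-- stated objective: faster
-- what changed: Replaces the full stable descending sort with a single pass that keeps the best and second-best sentences (strict > so earlier sentences win ties), assembling the top-2 result directly.
import Mathlib
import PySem

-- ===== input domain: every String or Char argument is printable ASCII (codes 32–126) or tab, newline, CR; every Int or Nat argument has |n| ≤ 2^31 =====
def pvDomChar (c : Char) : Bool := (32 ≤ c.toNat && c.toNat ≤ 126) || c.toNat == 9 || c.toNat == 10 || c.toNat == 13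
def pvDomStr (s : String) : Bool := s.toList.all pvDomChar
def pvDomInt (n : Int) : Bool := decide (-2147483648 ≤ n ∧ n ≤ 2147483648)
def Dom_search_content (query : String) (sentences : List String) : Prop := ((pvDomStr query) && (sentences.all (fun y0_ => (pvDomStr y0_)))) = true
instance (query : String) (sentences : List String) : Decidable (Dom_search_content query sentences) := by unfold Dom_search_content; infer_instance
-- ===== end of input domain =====

-- B replaces the full stable sort by a single pass that tracks the best and second-best
-- sentence; objective: faster (one O(n) pass instead of sorting). Return values are equal.

-- ===== PORT A =====
-- score of a sentence s: sum(word in s.lower() for word in query.split()) with query lowered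
def pvKey (words : List String) (s : String) : Int :=
  (words.map (fun w => if PySem.Str.isIn w (PySem.Str.lower s) then (1 : Int) else 0)).sum

def search_content (query : String) (sentences : List String) : List String :=
  let q := PySem.Str.lower query
  let results := PySem.List.sorted sentences (pvKey (PySem.Str.split₀ q)) true
  if results = [] then ["No relevant information found."]
  else PySem.List.slice results none (some 2)

-- ===== PORT B =====
-- one loop iteration of B: state = (best, second), each an optional (score, sentence)
def pvStep (k : String → Int) (st : Option (Int × String) × Option (Int × String)) (s : String) :
    Option (Int × String) × Option (Int × String) :=
  let sc := k s
  match st.1 with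
  | none => (some (sc, s), st.1)
  | some b =>
    if sc > b.1 then (some (sc, s), st.1)
    else
      match st.2 with
      | none => (st.1, some (sc, s))
      | some c => if sc > c.1 then (st.1, some (sc, s)) else st

def search_content_alt (query : String) (sentences : List String) : List String :=
  let words := PySem.Str.split₀ (PySem.Str.lower query)
  let st := sentences.foldl (pvStep (pvKey words)) (none, none)
  match st with
  | (none, _) => ["No relevant information found."]
  | (some b, none) => [b.2]
  | (some b, some c) => [b.2, c.2]

-- ===== PRECONDITION & SPEC =====
def Spec_search_content (query : String) (sentences : List String) (out : List String) : Prop := out = search_content_alt query sentences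
instance (query : String) (sentences : List String) (out : List String) : Decidable (Spec_search_content query sentences out) := by unfold Spec_search_content; infer_instance

-- ===== CLAIM (what is proved, stated in full; the proofs are below) =====
def Claim_equal_search_content : Prop := ∀ (query : String) (sentences : List String), Dom_search_content query sentences → Spec_search_content query sentences (search_content query sentences)

-- ===== LEMMAS AND PROOFS =====

-- abstraction: the (best, second) view of a descending-sorted accumulator
def pvRep (k : String → Int) : List String → Option (Int × String) × Option (Int × String)
  | [] => (none, none)
  | [a] => (some (k a, a), none)
  | a :: b :: _ => (some (k a, a), some (k b, b))

theorem pvRep_insertBy (k : String → Int) (x : String) (acc : List String) :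
    pvRep k (PySem.List.insertBy (fun a b => decide (k b < k a)) x acc)
      = pvStep k (pvRep k acc) x := by
  match acc with
  | [] => simp [PySem.List.insertBy, pvRep, pvStep]
  | [a] =>
    by_cases h : k a < k x
    · simp [PySem.List.insertBy, pvRep, pvStep, h]
    · simp [PySem.List.insertBy, pvRep, pvStep, h]
  | a :: b :: t =>
    by_cases h1 : k a < k x
    · simp [PySem.List.insertBy, pvRep, pvStep, h1]
    · by_cases h2 : k b < k x
      · simp [PySem.List.insertBy, pvRep, pvStep, h1, h2]
      · cases t with
        | nil => simp [PySem.List.insertBy, pvRep, pvStep, h1, h2]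
        | cons c t' => simp [PySem.List.insertBy, pvRep, pvStep, h1, h2]

theorem pvRep_foldl (k : String → Int) (xs acc : List String) :
    pvRep k (xs.foldl (fun acc x => PySem.List.insertBy (fun a b => decide (k b < k a)) x acc) acc)
      = xs.foldl (pvStep k) (pvRep k acc) := by
  induction xs generalizing acc with
  | nil => rfl
  | cons x xs ih => simp only [List.foldl_cons, ih, pvRep_insertBy]

theorem search_content_spec : Claim_equal_search_content := by
  intro query sentences _
  unfold Spec_search_content search_content search_content_alt
  dsimp only
  rw [PySem.List.sorted_rev_eq_foldl_insertBy,
    show ((none, none) : Option (Int × String) × Option (Int × String))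
      = pvRep (pvKey (PySem.Str.split₀ (PySem.Str.lower query))) [] from rfl,
    ← pvRep_foldl]
  cases h : List.foldl (fun acc x => PySem.List.insertBy
      (fun a b => decide (pvKey (PySem.Str.split₀ (PySem.Str.lower query)) b
        < pvKey (PySem.Str.split₀ (PySem.Str.lower query)) a)) x acc) [] sentences with
  | nil => simp [pvRep]
  | cons a t =>
    cases t with
    | nil =>
      simp only [pvRep]
      rw [if_neg (by simp)]
      rw [PySem.List.slice_to _ (by norm_num)]
      rfl
    | cons b t' =>
      simp only [pvRep]
      rw [if_neg (by simp)]
      rw [PySem.List.slice_to _ (by norm_num)]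
      rfl
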